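-- pv_equiv track=rewrite | github.com/SonicBotMan/lobster-press | src/skills/task_detector.py | _group_user_turns
-- ===== SOURCE A (Python) =====
-- from typing import List, Dict, Optional
--
-- def _group_user_turns(messages: List[Dict]) -> List[List[Dict]]:
--     """将消息按用户回合分组
--
--     连续的用户消息被归为同一回合。
--
--     Args:
--         messages: 消息列表
--
--     Returns:
--         用户回合列表，每个回合包含多条消息
--     """
--     turns = []
--     current_turn = []
--
--     for msg in messages:
--         role = msg.get("role", "")
--         if role == "user" and current_turn:
--             # 新的用户消息开始新回合
--             turns.append(current_turn)
--             current_turn = [msg]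
--         else:
--             current_turn.append(msg)
--
--     if current_turn:
--         turns.append(current_turn)
--
--     return turns
-- ===== SOURCE B (Python) =====
-- from typing import List, Dict
--
-- def _group_user_turns(messages: List[Dict]) -> List[List[Dict]]:
--     """Group messages into user turns by slicing at boundary indices."""
--     if not messages:
--         return []
--     n = len(messages)
--     starts = [0] + [i for i in range(1, n) if messages[i].get("role", "") == "user"]
--     ends = starts[1:] + [n]
--     return [messages[s:e] for s, e in zip(starts, ends)]
-- ===== Notes on version B (the rewrite author's own statement) =====
-- stated objective: alternative
-- what changed: Replaces A's single accumulate/flush loop with mutable current-turn state by a two-phase decomposition: first collect the boundary indices i>0 where messages[i] has role 'user', then cut the list into slices between consecutive boundaries.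
import Mathlib
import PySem

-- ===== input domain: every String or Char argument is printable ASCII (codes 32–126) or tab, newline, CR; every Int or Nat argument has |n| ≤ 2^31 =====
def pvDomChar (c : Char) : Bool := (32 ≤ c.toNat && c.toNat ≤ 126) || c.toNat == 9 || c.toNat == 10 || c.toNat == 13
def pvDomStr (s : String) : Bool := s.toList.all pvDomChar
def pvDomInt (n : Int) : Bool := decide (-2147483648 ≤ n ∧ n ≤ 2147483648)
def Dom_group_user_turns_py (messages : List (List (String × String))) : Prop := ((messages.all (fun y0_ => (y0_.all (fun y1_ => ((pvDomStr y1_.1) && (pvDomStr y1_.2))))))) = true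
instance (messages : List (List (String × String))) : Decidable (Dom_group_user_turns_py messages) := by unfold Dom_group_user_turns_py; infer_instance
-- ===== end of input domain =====

-- B replaces A's per-element accumulate/flush loop by a two-phase find-boundary-indices-then-slice
-- decomposition (objective: alternative decomposition, same cost; return value only — neither mutates).

-- ===== PORT A =====
def group_user_turns_py (messages : List (List (String × String))) : List (List (List (String × String))) :=
  let st := messages.foldl
    (fun (st : List (List (List (String × String))) × List (List (String × String))) msg =>
      let role := (PySem.Dict.mk msg).getD "role" ""
      if role == "user" && !st.2.isEmpty then
        (st.1 ++ [st.2], [msg])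
      else
        (st.1, st.2 ++ [msg]))
    ([], [])
  if st.2.isEmpty then st.1 else st.1 ++ [st.2]

-- ===== PORT B =====
def group_user_turns_py_alt (messages : List (List (String × String))) : List (List (List (String × String))) :=
  if messages.isEmpty then []
  else
    let n : Int := messages.length
    let starts : List Int := 0 :: ((PySem.List.pyRange 1 n 1).filter (fun i =>
        (PySem.Dict.mk (PySem.List.pyGetD messages i [])).getD "role" "" == "user"))
    let ends : List Int := starts.tail ++ [n]
    (starts.zip ends).map (fun p => PySem.List.slice messages (some p.1) (some p.2))

-- ===== PRECONDITION & SPEC =====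
def Spec_group_user_turns_py (messages : List (List (String × String))) (out : List (List (List (String × String)))) : Prop := out = group_user_turns_py_alt messages
instance (messages : List (List (String × String))) (out : List (List (List (String × String)))) : Decidable (Spec_group_user_turns_py messages out) := by unfold Spec_group_user_turns_py; infer_instance

-- ===== CLAIM (what is proved, stated in full; the proofs are below) =====
def Claim_equal_group_user_turns_py : Prop := ∀ (messages : List (List (String × String))), Dom_group_user_turns_py messages → Spec_group_user_turns_py messages (group_user_turns_py messages)

-- ===== LEMMAS AND PROOFS =====

def isUser (m : List (String × String)) : Bool := (PySem.Dict.mk m).getD "role" "" == "user"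

-- (prefix before the first user message, groups each starting at a user message)
def splitT : List (List (String × String)) → List (List (String × String)) × List (List (List (String × String)))
  | [] => ([], [])
  | m :: ms =>
    let p := splitT ms
    if isUser m then ([], (m :: p.1) :: p.2) else (m :: p.1, p.2)

-- reference recursion: A's loop as structural recursion with the current-turn accumulator
def G (ct : List (List (String × String))) : List (List (String × String)) → List (List (List (String × String)))
  | [] => if ct.isEmpty then [] else [ct]
  | m :: ms => if isUser m && !ct.isEmpty then ct :: G [m] ms else G (ct ++ [m]) ms

-- user positions of a list, structurally
def cuts : List (List (String × String)) → List Nat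
  | [] => []
  | m :: ms => (if isUser m then [0] else []) ++ (cuts ms).map (· + 1)

-- chop xs at absolute cut positions, starting from position s
def chop (xs : List (List (String × String))) (s : Nat) : List Nat → List (List (List (String × String)))
  | [] => [(xs.drop s).take (xs.length - s)]
  | c :: cs => ((xs.drop s).take (c - s)) :: chop xs c cs

theorem foldA (ms : List (List (String × String))) :
    ∀ (ts : List (List (List (String × String)))) (ct : List (List (String × String))),
    (let st := ms.foldl
      (fun (st : List (List (List (String × String))) × List (List (String × String))) msg =>
        let role := (PySem.Dict.mk msg).getD "role" ""
        if role == "user" && !st.2.isEmpty then (st.1 ++ [st.2], [msg])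
        else (st.1, st.2 ++ [msg])) (ts, ct)
     if st.2.isEmpty then st.1 else st.1 ++ [st.2]) = ts ++ G ct ms := by
  induction ms with
  | nil =>
    intro ts ct
    simp only [List.foldl_nil, G]
    split_ifs with h <;> simp
  | cons m ms ih =>
    intro ts ct
    simp only [List.foldl_cons, G]
    by_cases h : (((PySem.Dict.mk m).getD "role" "" == "user") && !ct.isEmpty) = true
    · simp only [isUser, h, ih]
      simp
    · simp only [isUser] at h ⊢
      rw [if_neg h, if_neg h, ih]

theorem A_eq_G (ms : List (List (String × String))) : group_user_turns_py ms = G [] ms := by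
  have := foldA ms [] []
  simpa [group_user_turns_py] using this

theorem G_split (ms : List (List (String × String))) :
    ∀ ct, ct ≠ [] → G ct ms = (ct ++ (splitT ms).1) :: (splitT ms).2 := by
  induction ms with
  | nil => intro ct h; simp [G, splitT, h]
  | cons m ms ih =>
    intro ct h
    by_cases hu : isUser m = true
    · simp [G, splitT, hu, h, ih [m] (by simp)]
    · simp only [Bool.not_eq_true] at hu
      simp [G, splitT, hu, ih (ct ++ [m]) (by simp)]

theorem G_nil (ms : List (List (String × String))) :
    G [] ms = match ms with
      | [] => []
      | m :: rest => (m :: (splitT rest).1) :: (splitT rest).2 := by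
  cases ms with
  | nil => simp [G]
  | cons m rest => simp [G, G_split rest [m] (by simp)]


theorem cuts_eq (xs : List (List (String × String))) :
    (List.range xs.length).filter (fun k => isUser (xs.getD k [])) = cuts xs := by
  induction xs with
  | nil => simp [cuts]
  | cons x xs ih =>
    simp only [List.length_cons, List.range_succ_eq_map, List.filter_cons, List.filter_map,
      cuts, ← ih]
    by_cases hu : isUser x = true <;>
      simp [hu, Function.comp_def]

theorem chop_shift (cs : List Nat) :
    ∀ (s : Nat) (y : List (String × String)) (xs : List (List (String × String))),
    chop (y :: xs) (s + 1) (cs.map (· + 1)) = chop xs s cs := by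
  induction cs with
  | nil => intro s y xs; simp [chop, Nat.succ_sub_succ]
  | cons c cs ih => intro s y xs; simp [chop, Nat.succ_sub_succ, ih]

theorem chop_cons (ds : List Nat) (m : List (String × String)) (ys : List (List (String × String))) :
    chop (m :: ys) 0 (ds.map (· + 1)) =
      (m :: (chop ys 0 ds).headD []) :: (chop ys 0 ds).tail := by
  cases ds with
  | nil => simp [chop]
  | cons d ds => simp [chop, chop_shift]

theorem chop_splitT (rest : List (List (String × String))) :
    ∀ m, chop (m :: rest) 0 ((cuts rest).map (· + 1)) = (m :: (splitT rest).1) :: (splitT rest).2 := by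
  induction rest with
  | nil => intro m; simp [cuts, chop, splitT]
  | cons x xs ih =>
    intro m
    by_cases hu : isUser x = true
    · have hc : cuts (x :: xs) = 0 :: (cuts xs).map (· + 1) := by simp [cuts, hu]
      rw [hc]
      show chop (m :: x :: xs) 0 (1 :: ((cuts xs).map (· + 1)).map (· + 1)) = _
      rw [chop]
      have h1 : chop (m :: x :: xs) 1 (((cuts xs).map (· + 1)).map (· + 1)) =
          chop (x :: xs) 0 ((cuts xs).map (· + 1)) := chop_shift _ 0 m (x :: xs)
      rw [h1, ih x]
      simp [splitT, hu]
    · simp only [Bool.not_eq_true] at hu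
      have hc : cuts (x :: xs) = (cuts xs).map (· + 1) := by simp [cuts, hu]
      rw [hc, chop_cons, ih x]
      simp [splitT, hu]

theorem zip_slice (cs : List Nat) :
    ∀ (s : Nat) (xs : List (List (String × String))),
    ((((s : Nat) : Int) :: cs.map (fun (k : Nat) => (k : Int))).zip
        (cs.map (fun (k : Nat) => (k : Int)) ++ [((xs.length : Nat) : Int)])).map
      (fun p => PySem.List.slice xs (some p.1) (some p.2)) = chop xs s cs := by
  induction cs with
  | nil => intro s xs; simp [chop, PySem.List.slice_natCast]
  | cons c cs ih =>
    intro s xs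
    simp only [List.map_cons, List.cons_append, List.zip_cons_cons, List.map_cons]
    rw [PySem.List.slice_natCast, ih c xs]
    simp [chop]

theorem boundary_key (m : List (String × String)) (ms : List (List (String × String))) :
    (PySem.List.pyRange 1 (((m :: ms).length : Nat) : Int) 1).filter (fun i =>
        (PySem.Dict.mk (PySem.List.pyGetD (m :: ms) i [])).getD "role" "" == "user")
      = ((cuts ms).map (· + 1)).map (fun (k : Nat) => (k : Int)) := by
  rw [PySem.List.pyRange_one]
  have hlen : ((((m :: ms).length : Nat) : Int) - 1).toNat = ms.length := by simp
  rw [hlen, List.filter_map]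
  have hpred : ∀ k ∈ List.range ms.length,
      ((fun i => (PySem.Dict.mk (PySem.List.pyGetD (m :: ms) i [])).getD "role" "" == "user") ∘
        (fun (k : Nat) => (1 : Int) + k)) k = isUser (ms.getD k []) := by
    intro k _
    have hcast : ((1 : Int) + (k : Nat)) = (((k + 1 : Nat)) : Int) := by push_cast; ring
    simp only [Function.comp_def]
    rw [hcast, PySem.List.pyGetD_natCast]
    simp [isUser, List.getD]
  rw [List.filter_congr hpred, cuts_eq, List.map_map]
  have hfun : (fun (k : Nat) => (1 : Int) + k) = ((fun (k : Nat) => (k : Int)) ∘ (· + 1)) := by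
    funext k; simp; ring
  rw [hfun]

theorem B_eq_G (ms : List (List (String × String))) : group_user_turns_py_alt ms = G [] ms := by
  cases ms with
  | nil => simp [group_user_turns_py_alt, G]
  | cons m rest =>
    rw [G_nil]
    show (((0 : Int) :: ((PySem.List.pyRange 1 (((m :: rest).length : Nat) : Int) 1).filter (fun i =>
            (PySem.Dict.mk (PySem.List.pyGetD (m :: rest) i [])).getD "role" "" == "user"))).zip
          (((0 : Int) :: ((PySem.List.pyRange 1 (((m :: rest).length : Nat) : Int) 1).filter (fun i =>
            (PySem.Dict.mk (PySem.List.pyGetD (m :: rest) i [])).getD "role" "" == "user"))).tail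
            ++ [(((m :: rest).length : Nat) : Int)])).map
        (fun p => PySem.List.slice (m :: rest) (some p.1) (some p.2)) = _
    rw [boundary_key m rest, List.tail_cons]
    rw [show (0 : Int) = ((0 : Nat) : Int) from by norm_num]
    rw [zip_slice ((cuts rest).map (· + 1)) 0 (m :: rest)]
    rw [chop_splitT rest m]

-- ===== VERDICT (by name: the statement is the Claim_ definition above) =====
theorem group_user_turns_py_spec : Claim_equal_group_user_turns_py := by
  intro messages _
  unfold Spec_group_user_turns_py
  rw [A_eq_G, B_eq_G]
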